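-- pv_equiv track=rewrite | github.com/kitotakumi/stability_scheduling | achirve/fire.py | check_disturbance
-- ===== SOURCE A (Python) =====
-- def convert_to_1d_gantt(gantt_chart):
--     flattened_gantt = []
--     # Iterate over each machine and its operations
--     for machine_number, operations in enumerate(gantt_chart):
--         for operation in operations:
--             st, et, jobn = operation
--             flattened_gantt.append([st, et, jobn, machine_number])
--     # Sort by start time (st)
--     sorted_gantt = sorted(flattened_gantt, key=lambda x: x[0])
--     return sorted_gantt
--
-- def convert_to_2d_gantt(flattened_gantt, num_machines):
--     gantt_chart_2d = [[] for _ in range(num_machines)]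
--     # Iterate over each entry in the flattened gantt chart
--     for entry in flattened_gantt:
--         st, et, jobn, machine_number = entry
--         gantt_chart_2d[machine_number].append([st, et, jobn])
--     return gantt_chart_2d
--
-- def check_disturbance(init_gantt, delayed_gantt):
--     # fixed_gantt = 既に始まっている作業  reschedule_gantt = リスケ対象の作業
--     fixed_gantt = [[] for _ in range(len(delayed_gantt))]
--     reschedule_gantt = []
--     # 終了時間が変わっている作業を特定
--     flag = False
--     for machine_index, (machine_init, machine_delayed) in enumerate(
--         zip(init_gantt, delayed_gantt)):  # fmt: skip
--         for task_init, task_delayed in zip(machine_init, machine_delayed):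
--             # 作業終了時刻が15以上ずれていたら遅延として認識
--             if (task_init[1] - 15 > task_delayed[1]
--                 or task_delayed[1] > task_init[1] + 15):  # fmt: skip
--                 # different_task = [開始時刻, 終了時刻, ジョブ番号, 機械番号] = 遅延した作業
--                 different_task = [task_delayed[0], task_delayed[1], task_delayed[2], machine_index]  # fmt: skip
--                 reschedule_time = task_delayed[1] + 1
--                 flag = True
--                 break
--         if flag:
--             break
--     if flag:
--         sorted_gantt = convert_to_1d_gantt(delayed_gantt)
--         # 参照を切ってコピー
--         gantt_copy = [row[:] for row in sorted_gantt]
--         sorted_fixed_gantt = []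
--         for i, row in enumerate(sorted_gantt):
--             st, et, job, machine = row
--             # 自分より前に同じjobを持つ要素があるかどうかをチェック
--             judge = True
--             for c in gantt_copy:
--                 if c == row:
--                     break
--                 if c[2] == job:
--                     judge = False
--             if judge == True:
--                 # stが379未満か確認
--                 if st < 379:
--                     # diffの条件に該当しないか確認 (stがdiffのstより大きく、かつmachineが同じでないこと)
--                     if not (st > different_task[0] and machine == different_task[3]):
--                         # 条件を満たした場合、bに追加
--                         sorted_fixed_gantt.append(row)
--                         # その要素がdiffと等しくない限りa_copyから削除
--                         if row != different_task:
--                             gantt_copy.remove(row)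
--         fixed_gantt = convert_to_2d_gantt(sorted_fixed_gantt, len(delayed_gantt))
--         # リスケジューリング対象の作業をreschedule_machineに格納
--         for machine_idx, machine in enumerate(delayed_gantt):
--             updated_machine = [task for task in machine if task not in fixed_gantt[machine_idx]]  # fmt: skip
--             reschedule_gantt.append(updated_machine)
--
--     if flag:
--         return (fixed_gantt, reschedule_gantt, reschedule_time,
--             "遅延作業を検知しました。リスケジューリングします",)  # fmt: skip
--     else:
--         reschedule_time = 0
--         return (fixed_gantt, reschedule_gantt, reschedule_time,
--             "リスケジューリングは行いません",)  # fmt: skip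
-- ===== SOURCE B (Python) =====
-- def check_disturbance(init_gantt, delayed_gantt):
--     # Find the first operation whose end time drifted by more than 15.
--     diff = None
--     for mi, (machine_init, machine_delayed) in enumerate(zip(init_gantt, delayed_gantt)):
--         for ti, td in zip(machine_init, machine_delayed):
--             if not (ti[1] - 15 <= td[1] <= ti[1] + 15):
--                 diff = [td[0], td[1], td[2], mi]
--                 break
--         if diff is not None:
--             break
--     if diff is None:
--         return ([[] for _ in delayed_gantt], [], 0, "リスケジューリングは行いません")
--     # One pass over the start-time-sorted operations: a job becomes "blocked" the
--     # first time one of its operations is left unfixed (or is the delayed op itself).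
--     rows = sorted(
--         ([t[0], t[1], t[2], mi] for mi, m in enumerate(delayed_gantt) for t in m),
--         key=lambda r: r[0],
--     )
--     blocked = set()
--     fixed_gantt = [[] for _ in delayed_gantt]
--     for st, et, job, m in rows:
--         if job in blocked:
--             continue
--         if st < 379 and not (st > diff[0] and m == diff[3]):
--             fixed_gantt[m].append([st, et, job])
--             if [st, et, job, m] == diff:
--                 blocked.add(job)
--         else:
--             blocked.add(job)
--     fixed_sets = [set(map(tuple, m)) for m in fixed_gantt]
--     reschedule_gantt = [
--         [t for t in m if tuple(t) not in fixed_sets[mi]]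
--         for mi, m in enumerate(delayed_gantt)
--     ]
--     return (fixed_gantt, reschedule_gantt, diff[1] + 1,
--             "遅延作業を検知しました。リスケジューリングします")
-- ===== Notes on version B (the rewrite author's own statement) =====
-- stated objective: alternative
-- what changed: A rescans and mutates a copy of the whole sorted chart for every row and tests reschedule membership against lists; B does one pass over the sorted rows with a 'blocked jobs' set, per-machine appends, and set-based membership for the reschedule filter.
import Mathlib
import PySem

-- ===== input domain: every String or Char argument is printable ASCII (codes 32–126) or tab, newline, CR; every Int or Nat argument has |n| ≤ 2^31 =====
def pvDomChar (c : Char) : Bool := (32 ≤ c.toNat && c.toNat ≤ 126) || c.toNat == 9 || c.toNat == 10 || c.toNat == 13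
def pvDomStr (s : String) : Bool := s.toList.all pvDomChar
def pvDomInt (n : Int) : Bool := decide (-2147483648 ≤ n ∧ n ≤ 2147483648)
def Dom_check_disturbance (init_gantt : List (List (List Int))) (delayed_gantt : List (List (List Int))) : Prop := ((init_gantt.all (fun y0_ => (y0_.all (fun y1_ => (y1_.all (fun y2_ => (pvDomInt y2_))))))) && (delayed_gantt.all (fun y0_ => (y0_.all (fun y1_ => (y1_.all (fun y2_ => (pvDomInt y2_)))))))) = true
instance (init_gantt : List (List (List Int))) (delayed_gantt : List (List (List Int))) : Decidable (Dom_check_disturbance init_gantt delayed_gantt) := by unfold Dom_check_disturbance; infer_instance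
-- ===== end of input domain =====

-- B replaces A's rescan-and-remove over a mutating copy of the sorted chart by a single pass
-- with a "blocked jobs" set (objective: alternative); return values agree on Pre_.

-- ===== PORT A =====

-- 'st, et, jobn = operation' raises ValueError unless len = 3 (excluded by Pre_); fallback [] is never reached inside Pre_.
def pvUnpack3 (op : List Int) (mi : Int) : List Int :=
  match op with
  | [st, et, jobn] => [st, et, jobn, mi]
  | _ => []

-- convert_to_1d_gantt
def pvConvert1d (gantt : List (List (List Int))) : List (List Int) :=
  PySem.List.sorted
    ((PySem.List.enumerate gantt).foldl
      (fun acc p => acc ++ p.2.map (fun op => pvUnpack3 op p.1)) [])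
    (fun r => PySem.List.pyGetD r 0 0) false

-- 'gantt_chart_2d[machine_number].append(entry)'; the index is always in range by construction
-- (machine numbers come from enumerate over the same chart), so the out-of-range case is unreachable.
def pvAppendAt (g : List (List (List Int))) (i : Nat) (t : List Int) : List (List (List Int)) :=
  match g, i with
  | [], _ => []
  | x :: xs, 0 => (x ++ [t]) :: xs
  | x :: xs, Nat.succ n => x :: pvAppendAt xs n t

-- convert_to_2d_gantt; rows are always [st, et, jobn, machine] with machine ≥ 0 by construction
def pvConvert2d (flat : List (List Int)) (n : Nat) : List (List (List Int)) :=
  flat.foldl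
    (fun g row =>
      match row with
      | [st, et, jobn, m] => pvAppendAt g m.natAbs [st, et, jobn]
      | _ => g)
    (List.replicate n [])

-- the inner 'for task_init, task_delayed in zip(...)' search for the first drifted task
def pvFindInnerA (mi : Int) : List (List Int × List Int) → Option (List Int)
  | [] => none
  | (ti, td) :: rest =>
    if PySem.List.pyGetD ti 1 0 - 15 > PySem.List.pyGetD td 1 0
        ∨ PySem.List.pyGetD td 1 0 > PySem.List.pyGetD ti 1 0 + 15 then
      some [PySem.List.pyGetD td 0 0, PySem.List.pyGetD td 1 0, PySem.List.pyGetD td 2 0, mi]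
    else pvFindInnerA mi rest

-- the outer 'for machine_index, (...) in enumerate(zip(...))' loop with the flag-break
def pvFindOuterA : List (Int × (List (List Int) × List (List Int))) → Option (List Int)
  | [] => none
  | (mi, gs) :: rest =>
    match pvFindInnerA mi (gs.1.zip gs.2) with
    | some d => some d
    | none => pvFindOuterA rest

-- 'for c in gantt_copy: if c == row: break / if c[2] == job: judge = False'
def pvJudge : List (List Int) → List Int → Int → Bool → Bool
  | [], _, _, judge => judge
  | c :: rest, row, job, judge =>
    if c = row then judge
    else pvJudge rest row job (if PySem.List.pyGetD c 2 0 = job then false else judge)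

-- 'gantt_copy.remove(row)' (row is always present when removed, so no ValueError arises)
def pvRemoveFirst : List (List Int) → List Int → List (List Int)
  | [], _ => []
  | c :: rest, x => if c = x then rest else c :: pvRemoveFirst rest x

-- the main 'for i, row in enumerate(sorted_gantt)' loop (i is unused in the Python)
def pvALoop (rows : List (List Int)) (diff : List Int) (copy : List (List Int))
    (acc : List (List Int)) : List (List Int) :=
  match rows with
  | [] => acc
  | row :: rest =>
    if pvJudge copy row (PySem.List.pyGetD row 2 0) true then
      if PySem.List.pyGetD row 0 0 < 379 then
        if ¬ (PySem.List.pyGetD row 0 0 > PySem.List.pyGetD diff 0 0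
              ∧ PySem.List.pyGetD row 3 0 = PySem.List.pyGetD diff 3 0) then
          pvALoop rest diff (if row ≠ diff then pvRemoveFirst copy row else copy) (acc ++ [row])
        else pvALoop rest diff copy acc
      else pvALoop rest diff copy acc
    else pvALoop rest diff copy acc

-- the reschedule loop: 'updated_machine = [task for task in machine if task not in fixed_gantt[machine_idx]]'
def pvReschedA (delayed : List (List (List Int))) (fixed : List (List (List Int))) :
    List (List (List Int)) :=
  (PySem.List.enumerate delayed).foldl
    (fun acc p => acc ++ [p.2.filter (fun t => decide (t ∉ PySem.List.pyGetD fixed p.1 []))]) []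

def check_disturbance (init_gantt : List (List (List Int))) (delayed_gantt : List (List (List Int))) : List (List (List Int)) × List (List (List Int)) × Int × String :=
  match pvFindOuterA (PySem.List.enumerate (init_gantt.zip delayed_gantt)) with
  | none =>
    (List.replicate delayed_gantt.length [], [], 0, "リスケジューリングは行いません")
  | some diff =>
    let sortedG := pvConvert1d delayed_gantt
    let fixedFlat := pvALoop sortedG diff sortedG []
    let fixed := pvConvert2d fixedFlat delayed_gantt.length
    (fixed, pvReschedA delayed_gantt fixed, PySem.List.pyGetD diff 1 0 + 1,
      "遅延作業を検知しました。リスケジューリングします")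

-- ===== PORT B =====

def pvFindInnerB (mi : Int) : List (List Int × List Int) → Option (List Int)
  | [] => none
  | (ti, td) :: rest =>
    if ¬ (PySem.List.pyGetD ti 1 0 - 15 ≤ PySem.List.pyGetD td 1 0
          ∧ PySem.List.pyGetD td 1 0 ≤ PySem.List.pyGetD ti 1 0 + 15) then
      some [PySem.List.pyGetD td 0 0, PySem.List.pyGetD td 1 0, PySem.List.pyGetD td 2 0, mi]
    else pvFindInnerB mi rest

def pvFindOuterB : List (Int × (List (List Int) × List (List Int))) → Option (List Int)
  | [] => none
  | (mi, gs) :: rest =>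
    match pvFindInnerB mi (gs.1.zip gs.2) with
    | some d => some d
    | none => pvFindOuterB rest

-- 'rows = sorted(([t[0], t[1], t[2], mi] for mi, m in enumerate(delayed_gantt) for t in m), key=...)'
def pvRowsB (delayed : List (List (List Int))) : List (List Int) :=
  PySem.List.sorted
    ((PySem.List.enumerate delayed).flatMap
      (fun p => p.2.map (fun t =>
        [PySem.List.pyGetD t 0 0, PySem.List.pyGetD t 1 0, PySem.List.pyGetD t 2 0, p.1])))
    (fun r => PySem.List.pyGetD r 0 0) false

-- B's single pass: skip blocked jobs, append early ops per machine, block a job when one of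
-- its ops stays unfixed (or is the delayed op itself)
def pvBLoop (rows : List (List Int)) (diff : List Int) (blocked : PySem.Set Int)
    (fixed : List (List (List Int))) : List (List (List Int)) :=
  match rows with
  | [] => fixed
  | r :: rest =>
    let st := PySem.List.pyGetD r 0 0
    let et := PySem.List.pyGetD r 1 0
    let job := PySem.List.pyGetD r 2 0
    let m := PySem.List.pyGetD r 3 0
    if PySem.Set.contains blocked job then pvBLoop rest diff blocked fixed
    else if st < 379 ∧ ¬ (st > PySem.List.pyGetD diff 0 0 ∧ m = PySem.List.pyGetD diff 3 0) then
      pvBLoop rest diff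
        (if [st, et, job, m] = diff then PySem.Set.add blocked job else blocked)
        (pvAppendAt fixed m.natAbs [st, et, job])
    else pvBLoop rest diff (PySem.Set.add blocked job) fixed

def check_disturbance_alt (init_gantt : List (List (List Int))) (delayed_gantt : List (List (List Int))) : List (List (List Int)) × List (List (List Int)) × Int × String :=
  match pvFindOuterB (PySem.List.enumerate (init_gantt.zip delayed_gantt)) with
  | none =>
    (List.replicate delayed_gantt.length [], [], 0, "リスケジューリングは行いません")
  | some diff =>
    let fixed := pvBLoop (pvRowsB delayed_gantt) diff PySem.Set.empty
        (List.replicate delayed_gantt.length [])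
    let fsets := fixed.map (fun m => PySem.Set.ofList m)
    let resched := (PySem.List.enumerate delayed_gantt).map
      (fun p => p.2.filter (fun t =>
        decide (t ∉ PySem.List.pyGetD fsets p.1 (PySem.Set.ofList []))))
    (fixed, resched, PySem.List.pyGetD diff 1 0 + 1,
      "遅延作業を検知しました。リスケジューリングします")

-- ===== PRECONDITION & SPEC =====
-- Pre_ requires every compared task pair to carry end times (else Python raises IndexError) and,
-- when some compared pair drifted by more than 15 (so rescheduling runs), that every delayed task
-- is an [st, et, job] triple (else Python raises ValueError) and that no delayed machine holds two
-- identical tasks — a corner where A's first-match scan/remove semantics is accidental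
-- (duplicate keys, first-vs-last match).
def Pre_check_disturbance (init_gantt : List (List (List Int))) (delayed_gantt : List (List (List Int))) : Prop :=
  (∀ p ∈ init_gantt.zip delayed_gantt, ∀ q ∈ p.1.zip p.2, 2 ≤ q.1.length ∧ 2 ≤ q.2.length) ∧
  ((∃ p ∈ init_gantt.zip delayed_gantt, ∃ q ∈ p.1.zip p.2,
      ¬ (PySem.List.pyGetD q.1 1 0 - 15 ≤ PySem.List.pyGetD q.2 1 0
         ∧ PySem.List.pyGetD q.2 1 0 ≤ PySem.List.pyGetD q.1 1 0 + 15)) →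
    (∀ m ∈ delayed_gantt, ∀ t ∈ m, t.length = 3) ∧ (∀ m ∈ delayed_gantt, m.Nodup))
instance (init_gantt : List (List (List Int))) (delayed_gantt : List (List (List Int))) : Decidable (Pre_check_disturbance init_gantt delayed_gantt) := by unfold Pre_check_disturbance; infer_instance

def pvWitness_check_disturbance : List (List (List Int)) × List (List (List Int)) :=
  ([[[0, 0, 0]]], [[[0, 100, 0]]])

def Spec_check_disturbance (init_gantt : List (List (List Int))) (delayed_gantt : List (List (List Int))) (out : List (List (List Int)) × List (List (List Int)) × Int × String) : Prop := out = check_disturbance_alt init_gantt delayed_gantt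
instance (init_gantt : List (List (List Int))) (delayed_gantt : List (List (List Int))) (out : List (List (List Int)) × List (List (List Int)) × Int × String) : Decidable (Spec_check_disturbance init_gantt delayed_gantt out) := by unfold Spec_check_disturbance; infer_instance

-- ===== CLAIM (what is proved, stated in full; the proofs are below) =====
def Claim_equal_check_disturbance : Prop := ∀ (init_gantt : List (List (List Int))) (delayed_gantt : List (List (List Int))), Dom_check_disturbance init_gantt delayed_gantt → Pre_check_disturbance init_gantt delayed_gantt → Spec_check_disturbance init_gantt delayed_gantt (check_disturbance init_gantt delayed_gantt)

-- ===== LEMMAS AND PROOFS =====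

-- the two drift tests are the same condition
theorem pvFindInner_eq (mi : Int) (l : List (List Int × List Int)) :
    pvFindInnerA mi l = pvFindInnerB mi l := by
  induction l with
  | nil => rfl
  | cons p rest ih =>
    obtain ⟨ti, td⟩ := p
    simp only [pvFindInnerA, pvFindInnerB]
    by_cases h : PySem.List.pyGetD ti 1 0 - 15 ≤ PySem.List.pyGetD td 1 0
        ∧ PySem.List.pyGetD td 1 0 ≤ PySem.List.pyGetD ti 1 0 + 15
    · rw [if_neg (by omega), if_neg (by simp [h]), ih]
    · rw [if_pos (by omega), if_pos h]

theorem pvFindOuter_eq (l : List (Int × (List (List Int) × List (List Int)))) :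
    pvFindOuterA l = pvFindOuterB l := by
  induction l with
  | nil => rfl
  | cons p rest ih =>
    simp only [pvFindOuterA, pvFindOuterB, pvFindInner_eq, ih]

theorem pvFlatMap_congr {α β : Type} (l : List α) (f g : α → List β)
    (h : ∀ p ∈ l, f p = g p) : l.flatMap f = l.flatMap g := by
  induction l with
  | nil => rfl
  | cons x rest ih =>
    simp only [List.flatMap_cons, h x (by simp), ih (fun p hp => h p (by simp [hp]))]

-- under Pre_ (triples) both versions flatten delayed_gantt to the same row list
theorem pvConvert1d_eq_rowsB (delayed : List (List (List Int)))
    (h3 : ∀ m ∈ delayed, ∀ t ∈ m, t.length = 3) :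
    pvConvert1d delayed = pvRowsB delayed := by
  unfold pvConvert1d pvRowsB
  rw [PySem.List.foldl_append_eq_flatMap]
  congr 1
  simp only [List.nil_append]
  apply pvFlatMap_congr
  intro p hp
  have hm : p.2 ∈ delayed := by
    rcases (PySem.List.mem_enumerate_iff _ _ _).1 hp with ⟨k, hk, rfl⟩
    exact List.getElem_mem hk
  apply List.map_congr_left
  intro t ht
  have := h3 _ hm t ht
  match t, this with
  | [a, b, c], _ => rfl

-- every row of the sorted flat chart is a 4-list [st, et, job, machine]
theorem pvRowsB_shape (delayed : List (List (List Int))) :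
    ∀ r ∈ pvRowsB delayed, ∃ a b c m, r = [a, b, c, m] := by
  intro r hr
  unfold pvRowsB at hr
  rw [PySem.List.mem_sorted] at hr
  rcases List.mem_flatMap.1 hr with ⟨p, _, hr2⟩
  rcases List.mem_map.1 hr2 with ⟨t, _, rfl⟩
  exact ⟨_, _, _, _, rfl⟩

theorem pvRowsB_nodup (delayed : List (List (List Int)))
    (h3 : ∀ m ∈ delayed, ∀ t ∈ m, t.length = 3)
    (hnd : ∀ m ∈ delayed, m.Nodup) :
    (pvRowsB delayed).Nodup := by
  unfold pvRowsB
  refine (PySem.List.sorted_perm _ _ _).nodup_iff.2 ?_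
  have key : ∀ (l : List (Int × List (List Int))),
      (l.Pairwise (fun p q => p.1 ≠ q.1)) →
      (∀ p ∈ l, p.2 ∈ delayed) →
      (l.flatMap (fun p => p.2.map (fun t =>
        [PySem.List.pyGetD t 0 0, PySem.List.pyGetD t 1 0, PySem.List.pyGetD t 2 0, p.1]))).Nodup := by
    intro l
    induction l with
    | nil => intro _ _; simp
    | cons p rest ih =>
      intro hpw hmem
      simp only [List.flatMap_cons]
      rw [List.nodup_append]
      refine ⟨?_, ih (List.Pairwise.of_cons hpw) (fun q hq => hmem q (by simp [hq])), ?_⟩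
      · -- within one machine: the tag map is injective on triples
        have hm := hmem p (by simp)
        have h3' := h3 _ hm
        have hinj : ∀ t₁ ∈ p.2, ∀ t₂ ∈ p.2,
            ([PySem.List.pyGetD t₁ 0 0, PySem.List.pyGetD t₁ 1 0, PySem.List.pyGetD t₁ 2 0, p.1] :
              List Int) =
            [PySem.List.pyGetD t₂ 0 0, PySem.List.pyGetD t₂ 1 0, PySem.List.pyGetD t₂ 2 0, p.1] →
            t₁ = t₂ := by
          intro t₁ h₁ t₂ h₂ heq
          match t₁, h3' t₁ h₁, t₂, h3' t₂ h₂ with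
          | [a₁, b₁, c₁], _, [a₂, b₂, c₂], _ => simpa using heq
        exact List.Nodup.map_on hinj (hnd _ hm)
      · -- across machines: the machine tag differs
        intro x hx y hy
        rcases List.mem_map.1 hx with ⟨t, _, rfl⟩
        rcases List.mem_flatMap.1 hy with ⟨q, hq, hy3⟩
        rcases List.mem_map.1 hy3 with ⟨t', _, rfl⟩
        have hne : p.1 ≠ q.1 := (List.pairwise_cons.1 hpw).1 q hq
        intro heq
        simp only [List.cons.injEq, and_true] at heq
        exact hne heq.2.2.2
  apply key
  · exact (PySem.List.pairwise_lt_enumerate delayed 0).imp (fun h => by omega)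
  · intro p hp
    rcases (PySem.List.mem_enumerate_iff _ _ _).1 hp with ⟨k, hk, rfl⟩
    exact List.getElem_mem hk

-- A's inner judge scan, characterised (row not yet seen in the prefix K)
theorem pvJudge_eq (K : List (List Int)) (row : List Int) (rest : List (List Int))
    (job : Int) (b : Bool) (h : row ∉ K) :
    pvJudge (K ++ row :: rest) row job b
      = (b && decide (∀ c ∈ K, ¬ PySem.List.pyGetD c 2 0 = job)) := by
  induction K generalizing b with
  | nil => simp [pvJudge]
  | cons c K ih =>
    have hcr : ¬ c = row := fun hc => h (by simp [hc])
    simp only [List.cons_append, pvJudge, if_neg hcr]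
    rw [ih _ (fun hK => h (by simp [hK]))]
    by_cases hc : PySem.List.pyGetD c 2 0 = job <;>
      simp [hc]

theorem pvRemoveFirst_append (K : List (List Int)) (row : List Int)
    (rest : List (List Int)) (h : row ∉ K) :
    pvRemoveFirst (K ++ row :: rest) row = K ++ rest := by
  induction K with
  | nil => simp [pvRemoveFirst]
  | cons c K ih =>
    have hcr : ¬ c = row := fun hc => h (by simp [hc])
    simp only [List.cons_append, pvRemoveFirst, if_neg hcr]
    rw [ih (fun hK => h (by simp [hK]))]

-- proof-only abstraction of both main loops: the emitted fixed rows, tracking blocked jobs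
def pvFlatB : List (List Int) → List Int → List Int → List (List Int)
  | [], _, _ => []
  | r :: rest, d, blocked =>
    if PySem.List.pyGetD r 2 0 ∈ blocked then pvFlatB rest d blocked
    else if PySem.List.pyGetD r 0 0 < 379
        ∧ ¬ (PySem.List.pyGetD r 0 0 > PySem.List.pyGetD d 0 0
             ∧ PySem.List.pyGetD r 3 0 = PySem.List.pyGetD d 3 0) then
      r :: pvFlatB rest d (if r = d then blocked ++ [PySem.List.pyGetD r 2 0] else blocked)
    else pvFlatB rest d (blocked ++ [PySem.List.pyGetD r 2 0])

-- the central invariant: A's loop over copy = K ++ suffix behaves like the blocked-set pass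
theorem pvALoop_eq_flatB (d : List Int) :
    ∀ (suffix K blocked : _) (acc : List (List Int)),
    (∀ c ∈ K, c ∉ suffix) → suffix.Nodup →
    (∀ j : Int, j ∈ blocked ↔ ∃ c ∈ K, PySem.List.pyGetD c 2 0 = j) →
    pvALoop suffix d (K ++ suffix) acc = acc ++ pvFlatB suffix d blocked := by
  intro suffix
  induction suffix with
  | nil => intro K blocked acc _ _ _; simp [pvALoop, pvFlatB]
  | cons row rest ih =>
    intro K blocked acc hdisj hnd hbl
    have hrowK : row ∉ K := fun hK => hdisj row hK (by simp)
    have hdisj' : ∀ c ∈ K, c ∉ rest := fun c hc hr => hdisj c hc (by simp [hr])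
    have hnd' : rest.Nodup := hnd.of_cons
    have hrowrest : row ∉ rest := (List.nodup_cons.1 hnd).1
    have hsplit : K ++ row :: rest = (K ++ [row]) ++ rest := by simp
    have hdisj2 : ∀ c ∈ K ++ [row], c ∉ rest := by
      intro c hc
      rcases List.mem_append.1 hc with h | h
      · exact hdisj' c h
      · simp only [List.mem_singleton] at h; subst h; exact hrowrest
    have hblext : ∀ j : Int, j ∈ blocked ++ [PySem.List.pyGetD row 2 0] ↔
        ∃ c ∈ K ++ [row], PySem.List.pyGetD c 2 0 = j := by
      intro j
      simp only [List.mem_append, List.mem_singleton, hbl j]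
      constructor
      · rintro (⟨c, hc, hj⟩ | rfl)
        · exact ⟨c, Or.inl hc, hj⟩
        · exact ⟨row, Or.inr rfl, rfl⟩
      · rintro ⟨c, hc | hc, hj⟩
        · exact Or.inl ⟨c, hc, hj⟩
        · subst hc; exact Or.inr hj.symm
    simp only [pvALoop, pvFlatB]
    rw [pvJudge_eq K row rest _ true hrowK]
    by_cases hblk : PySem.List.pyGetD row 2 0 ∈ blocked
    · -- blocked: judge is false, nothing emitted, row stays in the copy
      rcases (hbl _).1 hblk with ⟨c, hcK, hcj⟩
      have hjf : ¬ (∀ c ∈ K, ¬ PySem.List.pyGetD c 2 0 = PySem.List.pyGetD row 2 0) :=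
        fun hall => hall c hcK hcj
      have hblsame : ∀ j : Int, j ∈ blocked ↔ ∃ c ∈ K ++ [row], PySem.List.pyGetD c 2 0 = j := by
        intro j
        rw [hbl j]
        constructor
        · rintro ⟨c', hc', hj⟩; exact ⟨c', List.mem_append.2 (Or.inl hc'), hj⟩
        · rintro ⟨c', hc', hj⟩
          rcases List.mem_append.1 hc' with h | h
          · exact ⟨c', h, hj⟩
          · simp only [List.mem_singleton] at h; subst h; subst hj; exact ⟨c, hcK, hcj⟩
      rw [if_pos hblk]
      simp only [Bool.true_and, decide_eq_true_eq]
      rw [if_neg hjf, hsplit, ih (K ++ [row]) blocked acc hdisj2 hnd' hblsame]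
    · -- not blocked: judge is true
      have hjt : ∀ c ∈ K, ¬ PySem.List.pyGetD c 2 0 = PySem.List.pyGetD row 2 0 :=
        fun c hc hj => hblk ((hbl _).2 ⟨c, hc, hj⟩)
      rw [if_neg hblk]
      simp only [Bool.true_and, decide_eq_true_eq]
      rw [if_pos hjt]
      by_cases h1 : PySem.List.pyGetD row 0 0 < 379
      · rw [if_pos h1]
        by_cases h2 : ¬ (PySem.List.pyGetD row 0 0 > PySem.List.pyGetD d 0 0
            ∧ PySem.List.pyGetD row 3 0 = PySem.List.pyGetD d 3 0)
        · rw [if_pos h2]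
          by_cases hrd : row = d
          · -- row == diff: kept in the copy, its job becomes blocked
            rw [if_neg (show ¬ row ≠ d by simp [hrd]), if_pos ⟨h1, h2⟩, if_pos hrd]
            rw [hsplit, ih (K ++ [row]) (blocked ++ [PySem.List.pyGetD row 2 0]) (acc ++ [row])
              hdisj2 hnd' hblext]
            simp
          · -- row ≠ diff: removed from the copy, its job stays available
            rw [if_pos hrd, pvRemoveFirst_append K row rest hrowK, if_pos ⟨h1, h2⟩, if_neg hrd]
            rw [ih K blocked (acc ++ [row]) hdisj' hnd' hbl]
            simp
        · have hco : ¬ (PySem.List.pyGetD row 0 0 < 379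
              ∧ ¬ (PySem.List.pyGetD row 0 0 > PySem.List.pyGetD d 0 0
                   ∧ PySem.List.pyGetD row 3 0 = PySem.List.pyGetD d 3 0)) :=
            fun hc => h2 hc.2
          rw [if_neg h2, if_neg hco]
          rw [hsplit, ih (K ++ [row]) (blocked ++ [PySem.List.pyGetD row 2 0]) acc
            hdisj2 hnd' hblext]
      · have hco : ¬ (PySem.List.pyGetD row 0 0 < 379
            ∧ ¬ (PySem.List.pyGetD row 0 0 > PySem.List.pyGetD d 0 0
                 ∧ PySem.List.pyGetD row 3 0 = PySem.List.pyGetD d 3 0)) :=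
          fun hc => h1 hc.1
        rw [if_neg h1, if_neg hco]
        rw [hsplit, ih (K ++ [row]) (blocked ++ [PySem.List.pyGetD row 2 0]) acc
          hdisj2 hnd' hblext]

-- B's loop is the fold of convert_to_2d's step over the emitted rows
theorem pvGetD_quad_0 (a b c m : Int) : PySem.List.pyGetD [a, b, c, m] 0 0 = a := rfl
theorem pvGetD_quad_1 (a b c m : Int) : PySem.List.pyGetD [a, b, c, m] 1 0 = b := rfl
theorem pvGetD_quad_2 (a b c m : Int) : PySem.List.pyGetD [a, b, c, m] 2 0 = c := rfl
theorem pvGetD_quad_3 (a b c m : Int) : PySem.List.pyGetD [a, b, c, m] 3 0 = m := rfl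

theorem pvBLoop_eq_fold (d : List Int) :
    ∀ (rows : List (List Int)) (bs : PySem.Set Int) (bl : List Int)
      (fixed : List (List (List Int))),
    (∀ r ∈ rows, ∃ a b c m, r = [a, b, c, m]) →
    (∀ j : Int, j ∈ bs ↔ j ∈ bl) →
    pvBLoop rows d bs fixed
      = (pvFlatB rows d bl).foldl
          (fun g row =>
            match row with
            | [st, et, jobn, m] => pvAppendAt g m.natAbs [st, et, jobn]
            | _ => g) fixed := by
  intro rows
  induction rows with
  | nil => intro bs bl fixed _ _; simp [pvBLoop, pvFlatB]
  | cons r rest ih =>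
    intro bs bl fixed hshape hmem
    obtain ⟨a, b, c, m, rfl⟩ := hshape r (by simp)
    have hshape' : ∀ r ∈ rest, ∃ a b c m, r = [a, b, c, m] :=
      fun r hr => hshape r (by simp [hr])
    simp only [pvBLoop, pvFlatB, pvGetD_quad_0, pvGetD_quad_1, pvGetD_quad_2, pvGetD_quad_3,
      PySem.Set.contains]
    by_cases hc : c ∈ bl
    · rw [if_pos (by simpa using (hmem c).2 hc), if_pos hc]
      exact ih bs bl fixed hshape' hmem
    · rw [if_neg (by simpa using fun h => hc ((hmem c).1 h)), if_neg hc]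
      by_cases hcond : a < 379 ∧ ¬ (a > PySem.List.pyGetD d 0 0 ∧ m = PySem.List.pyGetD d 3 0)
      · rw [if_pos hcond, if_pos hcond]
        simp only [List.foldl_cons]
        by_cases hrd : ([a, b, c, m] : List Int) = d
        · rw [if_pos hrd, if_pos hrd]
          refine ih _ _ _ hshape' ?_
          intro j
          rw [PySem.Set.mem_add, hmem j]
          simp [or_comm]
        · rw [if_neg hrd, if_neg hrd]
          exact ih _ _ _ hshape' hmem
      · rw [if_neg hcond, if_neg hcond]
        refine ih _ _ _ hshape' ?_
        intro j
        rw [PySem.Set.mem_add, hmem j]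
        simp [or_comm]

-- a successful drift search exhibits a drifted pair (used to discharge Pre_'s implication)
theorem pvFindInnerB_some_drift (mi : Int) (l : List (List Int × List Int)) (d : List Int)
    (h : pvFindInnerB mi l = some d) :
    ∃ q ∈ l, ¬ (PySem.List.pyGetD q.1 1 0 - 15 ≤ PySem.List.pyGetD q.2 1 0
        ∧ PySem.List.pyGetD q.2 1 0 ≤ PySem.List.pyGetD q.1 1 0 + 15) := by
  induction l with
  | nil => simp [pvFindInnerB] at h
  | cons q rest ih =>
    obtain ⟨ti, td⟩ := q
    by_cases hc : ¬ (PySem.List.pyGetD ti 1 0 - 15 ≤ PySem.List.pyGetD td 1 0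
        ∧ PySem.List.pyGetD td 1 0 ≤ PySem.List.pyGetD ti 1 0 + 15)
    · exact ⟨(ti, td), by simp, hc⟩
    · rw [pvFindInnerB, if_neg hc] at h
      rcases ih h with ⟨q, hq, hdr⟩
      exact ⟨q, by simp [hq], hdr⟩

theorem pvFindOuterB_some_drift (l : List (Int × (List (List Int) × List (List Int))))
    (d : List Int) (h : pvFindOuterB l = some d) :
    ∃ p ∈ l, ∃ q ∈ p.2.1.zip p.2.2,
      ¬ (PySem.List.pyGetD q.1 1 0 - 15 ≤ PySem.List.pyGetD q.2 1 0
         ∧ PySem.List.pyGetD q.2 1 0 ≤ PySem.List.pyGetD q.1 1 0 + 15) := by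
  induction l with
  | nil => simp [pvFindOuterB] at h
  | cons p rest ih =>
    rw [pvFindOuterB] at h
    cases hin : pvFindInnerB p.1 (p.2.1.zip p.2.2) with
    | some d' =>
      rcases pvFindInnerB_some_drift _ _ _ hin with ⟨q, hq, hdr⟩
      exact ⟨p, by simp, q, hq, hdr⟩
    | none =>
      rw [hin] at h
      rcases ih h with ⟨p', hp', hq⟩
      exact ⟨p', by simp [hp'], hq⟩

theorem pvResched_eq (delayed fixed : List (List (List Int))) :
    pvReschedA delayed fixed
      = (PySem.List.enumerate delayed).map
          (fun p => p.2.filter (fun t =>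
            decide (t ∉ PySem.List.pyGetD (fixed.map (fun m => PySem.Set.ofList m)) p.1
              (PySem.Set.ofList [])))) := by
  unfold pvReschedA
  rw [PySem.List.foldl_append_singleton_eq_map]
  simp only [List.nil_append]
  apply List.map_congr_left
  intro p hp
  apply List.filter_congr
  intro t ht
  have hget : PySem.List.pyGetD (fixed.map (fun m => PySem.Set.ofList m)) p.1
      (PySem.Set.ofList []) = PySem.Set.ofList (PySem.List.pyGetD fixed p.1 []) :=
    PySem.List.pyGetD_map (fun m => PySem.Set.ofList m) fixed p.1 []
  rw [hget]
  simp [PySem.Set.mem_ofList]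

-- ===== VERDICT (by name: the statement is the Claim_ definition above) =====
theorem check_disturbance_spec : Claim_equal_check_disturbance := by
  intro init delayed _ hpre
  obtain ⟨hzip, hflag⟩ := hpre
  unfold Spec_check_disturbance check_disturbance check_disturbance_alt
  rw [pvFindOuter_eq]
  cases hfd : pvFindOuterB (PySem.List.enumerate (init.zip delayed)) with
  | none => rfl
  | some d =>
    dsimp only
    obtain ⟨h3, hnd⟩ := hflag (by
      rcases pvFindOuterB_some_drift _ _ hfd with ⟨p, hp, q, hq, hdr⟩
      rcases (PySem.List.mem_enumerate_iff _ _ _).1 hp with ⟨k, hk, rfl⟩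
      exact ⟨(init.zip delayed)[k], List.getElem_mem hk, q, hq, hdr⟩)
    have hrows : pvConvert1d delayed = pvRowsB delayed := pvConvert1d_eq_rowsB delayed h3
    have hA : pvALoop (pvRowsB delayed) d (pvRowsB delayed) []
        = pvFlatB (pvRowsB delayed) d [] := by
      simpa using pvALoop_eq_flatB d (pvRowsB delayed) [] [] []
        (by simp) (pvRowsB_nodup delayed h3 hnd) (by simp)
    have hB : pvBLoop (pvRowsB delayed) d PySem.Set.empty (List.replicate delayed.length [])
        = pvConvert2d (pvFlatB (pvRowsB delayed) d []) delayed.length := by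
      rw [pvBLoop_eq_fold d _ _ [] _ (pvRowsB_shape delayed) (by simp [PySem.Set.empty])]
      rfl
    rw [hrows, hA, hB, pvResched_eq]
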